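-- pv_equiv track=rewrite | github.com/thetechcollective/gh-tt | src/gh_tt/classes/semver.py | _compare_identifiers
-- ===== SOURCE A (Python) =====
-- def _compare_identifiers(self_identifiers: str, other_identifiers: str) -> bool:
--     """Generic method to compare dot-separated identifiers according to SemVer spec.
--     Works for both prerelease and build metadata.
--
--     Args:
--         self_identifiers: The first identifiers string
--         other_identifiers: The second identifiers string
--
--     Returns:
--         True if self_identifiers < other_identifiers, False otherwise
--     """
--     self_parts = self_identifiers.split('.')
--     other_parts = other_identifiers.split('.')
--
--     # Compare each identifier
--     for i in range(min(len(self_parts), len(other_parts))):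
--         self_is_numeric = self_parts[i].isdigit()
--         other_is_numeric = other_parts[i].isdigit()
--
--         # If both identifiers are numeric, compare numerically
--         if self_is_numeric and other_is_numeric:
--             self_num = int(self_parts[i])
--             other_num = int(other_parts[i])
--             if self_num != other_num:
--                 return self_num < other_num
--             continue
--
--         # If only one is numeric, numeric has lower precedence
--         if self_is_numeric:
--             return True  # self is lower
--         if other_is_numeric:
--             return False  # self is higher
--
--         # Otherwise compare lexically
--         if self_parts[i] != other_parts[i]:
--             return self_parts[i] < other_parts[i]
--
--     # If we get here, one string is a prefix of the other
--     # The shorter one is the smaller version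
--     return len(self_parts) < len(other_parts)
-- ===== SOURCE B (Python) =====
-- def _compare_identifiers(self_identifiers: str, other_identifiers: str) -> bool:
--     self_keys = [(0, int(p)) if p.isdigit() else (1, p)
--                  for p in self_identifiers.split('.')]
--     other_keys = [(0, int(p)) if p.isdigit() else (1, p)
--                   for p in other_identifiers.split('.')]
--     return self_keys < other_keys
-- ===== Notes on version B (the rewrite author's own statement) =====
-- stated objective: simpler
-- what changed: Replaces A's indexed loop with per-branch early returns by mapping every dot-part to a tagged comparison key ((0,int) for numeric, (1,str) otherwise) and returning a single built-in lexicographic list comparison.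
import Mathlib
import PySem

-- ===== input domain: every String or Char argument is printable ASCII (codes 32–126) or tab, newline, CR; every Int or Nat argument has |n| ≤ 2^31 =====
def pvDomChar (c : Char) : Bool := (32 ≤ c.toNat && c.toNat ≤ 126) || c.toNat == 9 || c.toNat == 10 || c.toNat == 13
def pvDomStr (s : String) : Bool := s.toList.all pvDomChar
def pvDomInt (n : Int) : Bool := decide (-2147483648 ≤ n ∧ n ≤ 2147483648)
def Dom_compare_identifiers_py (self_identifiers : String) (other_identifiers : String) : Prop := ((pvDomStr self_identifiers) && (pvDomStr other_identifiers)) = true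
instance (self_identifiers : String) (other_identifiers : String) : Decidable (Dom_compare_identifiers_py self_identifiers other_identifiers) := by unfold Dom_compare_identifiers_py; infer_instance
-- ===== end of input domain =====

-- Rewrite: B maps each dot-part to a tagged comparison key and does one lexicographic list comparison (simpler decomposition; same cost).

-- ===== PORT A =====
-- A's for-loop over range(min(len,len)) becomes structural recursion on the two part
-- lists; the final 'len < len' comparison is passed in unchanged as `fin`.
def pvLoopA : List String → List String → Bool → Bool
  | sp :: sps, op :: ops, fin =>
    let self_is_numeric := PySem.Str.strIsdigit sp
    let other_is_numeric := PySem.Str.strIsdigit op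
    if self_is_numeric && other_is_numeric then
      let self_num := (PySem.Int.ofStr? sp).getD 0   -- int() always succeeds on isdigit parts
      let other_num := (PySem.Int.ofStr? op).getD 0
      if self_num ≠ other_num then decide (self_num < other_num)
      else pvLoopA sps ops fin
    else if self_is_numeric then true
    else if other_is_numeric then false
    else if sp ≠ op then decide (sp < op)
    else pvLoopA sps ops fin
  | _, _, fin => fin

def compare_identifiers_py (self_identifiers : String) (other_identifiers : String) : Bool :=
  let self_parts := (PySem.Str.split? self_identifiers ".").getD []
  let other_parts := (PySem.Str.split? other_identifiers ".").getD []
  pvLoopA self_parts other_parts (decide (self_parts.length < other_parts.length))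

-- ===== PORT B =====
-- key: (0, int(p)) for numeric parts, (1, p) otherwise, encoded as Int ⊕ String.
def pvKey (p : String) : Int ⊕ String :=
  if PySem.Str.strIsdigit p then Sum.inl ((PySem.Int.ofStr? p).getD 0) else Sum.inr p

-- Python's < on the key tuples: tags compare first, then int/str payloads.
def pvKeyLt : (Int ⊕ String) → (Int ⊕ String) → Bool
  | Sum.inl a, Sum.inl b => decide (a < b)
  | Sum.inl _, Sum.inr _ => true
  | Sum.inr _, Sum.inl _ => false
  | Sum.inr a, Sum.inr b => decide (a < b)

-- Python's lexicographic list <.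
def pvListLt : List (Int ⊕ String) → List (Int ⊕ String) → Bool
  | _, [] => false
  | [], _ :: _ => true
  | a :: as, b :: bs => if a = b then pvListLt as bs else pvKeyLt a b

def compare_identifiers_py_alt (self_identifiers : String) (other_identifiers : String) : Bool :=
  pvListLt (((PySem.Str.split? self_identifiers ".").getD []).map pvKey)
           (((PySem.Str.split? other_identifiers ".").getD []).map pvKey)

-- ===== PRECONDITION & SPEC =====
def Spec_compare_identifiers_py (self_identifiers : String) (other_identifiers : String) (out : Bool) : Prop := out = compare_identifiers_py_alt self_identifiers other_identifiers
instance (self_identifiers : String) (other_identifiers : String) (out : Bool) : Decidable (Spec_compare_identifiers_py self_identifiers other_identifiers out) := by unfold Spec_compare_identifiers_py; infer_instance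

-- ===== CLAIM (what is proved, stated in full; the proofs are below) =====
def Claim_equal_compare_identifiers_py : Prop := ∀ (self_identifiers : String) (other_identifiers : String), Dom_compare_identifiers_py self_identifiers other_identifiers → Spec_compare_identifiers_py self_identifiers other_identifiers (compare_identifiers_py self_identifiers other_identifiers)

-- ===== LEMMAS AND PROOFS =====
theorem pvLoopA_eq_listLt (sps ops : List String) :
    pvLoopA sps ops (decide (sps.length < ops.length)) =
      pvListLt (sps.map pvKey) (ops.map pvKey) := by
  induction sps generalizing ops with
  | nil => cases ops <;> simp [pvLoopA, pvListLt]
  | cons sp sps ih =>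
    cases ops with
    | nil => simp [pvLoopA, pvListLt]
    | cons op ops =>
      rw [show (decide ((sp :: sps).length < (op :: ops).length))
            = decide (sps.length < ops.length) by simp]
      by_cases hs : PySem.Chars.strIsdigit sp.toList = true <;>
        by_cases ho : PySem.Chars.strIsdigit op.toList = true
      · by_cases hne : (PySem.Int.ofStr? sp).getD 0 = (PySem.Int.ofStr? op).getD 0 <;>
          simp [pvLoopA, pvListLt, pvKey, pvKeyLt, hs, ho, hne, ih]
      · simp [pvLoopA, pvListLt, pvKey, pvKeyLt, hs, ho]
      · simp [pvLoopA, pvListLt, pvKey, pvKeyLt, hs, ho]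
      · by_cases hne : sp = op <;>
          simp [pvLoopA, pvListLt, pvKey, pvKeyLt, hs, ho, hne, ih]

theorem pv_main (s o : String) :
    compare_identifiers_py s o = compare_identifiers_py_alt s o := by
  unfold compare_identifiers_py compare_identifiers_py_alt
  exact pvLoopA_eq_listLt _ _

-- ===== VERDICT (by name: the statement is the Claim_ definition above) =====
theorem compare_identifiers_py_spec : Claim_equal_compare_identifiers_py := by
  intro s o _
  unfold Spec_compare_identifiers_py
  exact pv_main s o
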